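-- pv_equiv track=rewrite | github.com/SamieJaffreyLab/DAGGER_MaP | DAGGER_MaP_python_scripts/simple_to_M2_map.py | count_commutations
-- ===== SOURCE A (Python) =====
-- def count_commutations(bitvectors):
--     commutations = [[0 for _ in range(len(bitvectors[0]))] for _ in range(len(bitvectors[0]))]
--     for bitvector in bitvectors:
--         for i in range(len(bitvector)):
--             if bitvector[i] == '1':
--                 for j in range(i+1, len(bitvector)):
--                     if bitvector[j] == '1':
--                         commutations[i][j] += 1
--                         commutations[j][i] += 1
--     return commutations
-- ===== SOURCE B (Python) =====
-- def count_commutations(bitvectors):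
--     # Inverted index: for each column i, the set of row ids whose bit i is '1';
--     # entry (i,j) is then the size of the intersection of the two column sets.
--     L = len(bitvectors[0])
--     cols = {}
--     for v, bv in enumerate(bitvectors):
--         for i, c in enumerate(bv):
--             if c == '1':
--                 cols.setdefault(i, set()).add(v)
--     empty = set()
--     return [[0 if i == j else len(cols.get(i, empty) & cols.get(j, empty))
--              for j in range(L)] for i in range(L)]
-- ===== Notes on version B (the rewrite author's own statement) =====
-- stated objective: alternative
-- what changed: B replaces A's per-row enumeration of all index pairs with in-place matrix increments by an inverted index: one pass collects, per column, the set of row ids whose bit is '1', and each off-diagonal entry is then the size of the intersection of two column sets (computed by Python's C-level set intersection).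
import Mathlib
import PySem

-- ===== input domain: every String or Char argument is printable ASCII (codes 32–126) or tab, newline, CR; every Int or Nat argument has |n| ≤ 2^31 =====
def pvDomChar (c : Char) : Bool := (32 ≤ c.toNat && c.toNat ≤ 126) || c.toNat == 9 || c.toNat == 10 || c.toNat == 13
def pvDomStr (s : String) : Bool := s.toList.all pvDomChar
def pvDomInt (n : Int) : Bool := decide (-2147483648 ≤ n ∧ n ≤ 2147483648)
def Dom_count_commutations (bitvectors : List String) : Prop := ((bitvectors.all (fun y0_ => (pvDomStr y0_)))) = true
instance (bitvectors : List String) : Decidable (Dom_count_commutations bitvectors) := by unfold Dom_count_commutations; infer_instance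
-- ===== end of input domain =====

-- B builds an inverted index (per column, the set of row ids whose bit is '1') and fills each
-- off-diagonal entry with the size of the intersection of two column sets, instead of A's
-- enumeration of index pairs per row with in-place matrix increments (objective: alternative).

-- ===== PORT A =====
-- commutations[i][j] += 1  (List.modify is a no-op out of range; Pre_ keeps indices in range)
def pvBump (m : List (List Int)) (i j : Nat) : List (List Int) :=
  m.modify i (fun r => r.modify j (· + 1))

-- the inner 'for j in range(i+1, len(bitvector))' loop
def pvInnerA (cs : List Char) (i : Nat) (m : List (List Int)) : List (List Int) :=
  (List.range' (i+1) (cs.length - (i+1))).foldl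
    (fun m j => if cs.getD j ' ' = '1' then pvBump (pvBump m i j) j i else m) m

def count_commutations (bitvectors : List String) : List (List Int) :=
  let L := (bitvectors.headD "").toList.length
  bitvectors.foldl
    (fun m bv =>
      (List.range bv.toList.length).foldl
        (fun m i => if bv.toList.getD i ' ' = '1' then pvInnerA bv.toList i m else m) m)
    (List.replicate L (List.replicate L (0 : Int)))

-- ===== PORT B =====
-- 'for i, c in enumerate(bv): if c == '1': cols.setdefault(i, set()).add(v)'
-- (setdefault(i, set()).add(v) mutates the stored set; as a value it is modify i ∅ (·.add v))
def pvAddOnes (v : Nat) (cs : List Char) (cols : PySem.Dict Nat (PySem.Set Nat)) :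
    PySem.Dict Nat (PySem.Set Nat) :=
  cs.zipIdx.foldl
    (fun d q => if q.1 = '1' then d.modify q.2 PySem.Set.empty (fun s => s.add v) else d) cols

def count_commutations_alt (bitvectors : List String) : List (List Int) :=
  let L := (bitvectors.headD "").toList.length
  let cols := bitvectors.zipIdx.foldl (fun d p => pvAddOnes p.2 p.1.toList d) PySem.Dict.empty
  (List.range L).map (fun i =>
    (List.range L).map (fun j =>
      if i = j then (0 : Int)
      else ((PySem.Set.inter (cols.getD i PySem.Set.empty)
        (cols.getD j PySem.Set.empty)).length : Int)))

-- ===== PRECONDITION & SPEC =====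
-- Pre_ excludes exactly the inputs where Python A raises: the empty list (bitvectors[0] is an
-- IndexError) and lists containing a vector with two '1's whose later '1' lies at an index ≥ L
-- (the write commutations[i][j] is then out of range).  A returns on every other input.
def Pre_count_commutations (bitvectors : List String) : Prop :=
  bitvectors ≠ [] ∧
    ∀ s ∈ bitvectors,
      s.toList.count '1' ≤ 1 ∨
      (s.toList.drop (bitvectors.headD "").toList.length).count '1' = 0
instance (bitvectors : List String) : Decidable (Pre_count_commutations bitvectors) := by
  unfold Pre_count_commutations; infer_instance

def pvWitness_count_commutations : List String := ["101", "011", "000"]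

def Spec_count_commutations (bitvectors : List String) (out : List (List Int)) : Prop :=
  out = count_commutations_alt bitvectors
instance (bitvectors : List String) (out : List (List Int)) :
    Decidable (Spec_count_commutations bitvectors out) := by
  unfold Spec_count_commutations; infer_instance

-- ===== CLAIM (what is proved, stated in full; the proofs are below) =====
def Claim_equal_count_commutations : Prop :=
  ∀ (bitvectors : List String), Dom_count_commutations bitvectors →
    Pre_count_commutations bitvectors →
    Spec_count_commutations bitvectors (count_commutations bitvectors)

-- ===== LEMMAS AND PROOFS =====

-- all ordered pairs (earlier, later) of a list
def pairsOf : List Nat → List (Nat × Nat)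
  | [] => []
  | i :: rest => rest.map (fun j => (i, j)) ++ pairsOf rest

-- the L×L matrix with entry function e
def mOf (L : Nat) (e : Nat → Nat → Int) : List (List Int) :=
  (List.range L).map (fun i => (List.range L).map (e i))

-- the positions of the '1' characters of a row
def pvOnes (cs : List Char) : List Nat :=
  (List.range cs.length).filter (fun i => cs.getD i ' ' = '1')

-- per-row contribution to entry (a, b)
def pvInd (cs : List Char) (a b : Nat) : Int :=
  if a ≠ b ∧ cs.getD a ' ' = '1' ∧ cs.getD b ' ' = '1' then 1 else 0

-- rows (among `rows`) having '1' at both a and b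
def pvCnt (rows : List String) (a b : Nat) : Int :=
  ((rows.filter (fun s =>
      decide (s.toList.getD a ' ' = '1') && decide (s.toList.getD b ' ' = '1'))).length : Int)

theorem foldl_if_filter {α : Type} (p : Nat → Bool) (h : α → Nat → α) (l : List Nat) (init : α) :
    l.foldl (fun acc x => if p x then h acc x else acc) init = (l.filter p).foldl h init := by
  induction l generalizing init with
  | nil => rfl
  | cons x t ih =>
      by_cases hp : p x <;> simp [hp, ih]

theorem drop_range_filter (n i : Nat) :
    (List.range n).drop (i+1) = (List.range n).filter (fun x => decide (i < x)) := by
  induction n with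
  | zero => rfl
  | succ n ih =>
      rw [List.range_succ, List.filter_append, List.drop_append, ih]
      by_cases h : i < n
      · have hlen : i + 1 - (List.range n).length = 0 := by simp; omega
        simp [hlen, h]
      · have hnil : (List.range n).filter (fun x => decide (i < x)) = [] := by
          rw [List.filter_eq_nil_iff]; intro a ha; simp at ha ⊢; omega
        simp [hnil, h]
        omega

theorem range'_eq_drop (n i : Nat) : List.range' i (n - i) = List.drop i (List.range n) := by
  rw [List.range_eq_range', List.drop_range']; simp

theorem pvOnes_length (cs : List Char) : (pvOnes cs).length = cs.count '1' := by
  induction cs with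
  | nil => rfl
  | cons c t ih =>
      unfold pvOnes at *
      rw [List.length_cons, List.range_succ_eq_map, List.filter_cons, List.filter_map]
      by_cases hc : c = '1' <;>
        (simp [hc, Function.comp_def, ← ih, List.count_cons]; rfl)

theorem mem_pvOnes {cs : List Char} {k : Nat} :
    k ∈ pvOnes cs ↔ k < cs.length ∧ cs.getD k ' ' = '1' := by
  simp [pvOnes, List.mem_filter, List.mem_range]

-- membership in pvOnes is exactly 'the character there is a 1' (out of range reads ' ')
theorem mem_pvOnes' {cs : List Char} {k : Nat} :
    k ∈ pvOnes cs ↔ cs.getD k ' ' = '1' := by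
  rw [mem_pvOnes]
  constructor
  · exact fun h => h.2
  · intro h
    refine ⟨?_, h⟩
    by_contra hk
    rw [List.getD_eq_default] at h
    · exact absurd h (by decide)
    · omega

theorem pairwise_pvOnes (cs : List Char) : (pvOnes cs).Pairwise (· < ·) :=
  List.Pairwise.filter _ List.pairwise_lt_range

theorem mem_pairsOf {xs : List Nat} {p : Nat × Nat} (hs : xs.Pairwise (· < ·))
    (hp : p ∈ pairsOf xs) : p.1 < p.2 ∧ p.1 ∈ xs ∧ p.2 ∈ xs := by
  induction xs with
  | nil => simp [pairsOf] at hp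
  | cons x t ih =>
      rw [pairsOf, List.mem_append] at hp
      rcases hp with hp | hp
      · obtain ⟨j, hj, rfl⟩ := List.mem_map.mp hp
        exact ⟨(List.pairwise_cons.mp hs).1 j hj, by simp, by simp [hj]⟩
      · obtain ⟨h1, h2, h3⟩ := ih (List.pairwise_cons.mp hs).2 hp
        exact ⟨h1, by simp [h2], by simp [h3]⟩

theorem mem_pairsOf_of {xs : List Nat} (hs : xs.Pairwise (· < ·)) {a b : Nat}
    (hab : a < b) (ha : a ∈ xs) (hb : b ∈ xs) : (a, b) ∈ pairsOf xs := by
  induction xs with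
  | nil => simp at ha
  | cons x t ih =>
      obtain ⟨hx, ht⟩ := List.pairwise_cons.mp hs
      rw [pairsOf, List.mem_append]
      rcases List.mem_cons.mp ha with rfl | ha'
      · left
        have hbt : b ∈ t := by
          rcases List.mem_cons.mp hb with rfl | h
          · omega
          · exact h
        exact List.mem_map.mpr ⟨b, hbt, rfl⟩
      · right
        have hbt : b ∈ t := by
          rcases List.mem_cons.mp hb with rfl | h
          · have := hx a ha'; omega
          · exact h
        exact ih ht ha' hbt

theorem nodup_pairsOf {xs : List Nat} (hs : xs.Pairwise (· < ·)) : (pairsOf xs).Nodup := by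
  induction xs with
  | nil => simp [pairsOf]
  | cons x t ih =>
      obtain ⟨hx, ht⟩ := List.pairwise_cons.mp hs
      rw [pairsOf]
      refine List.Nodup.append ?_ (ih ht) ?_
      · exact (ht.imp (fun h => Nat.ne_of_lt h)).map _
          (fun a b hab => by simpa using hab)
      · intro p hp hp'
        obtain ⟨j, hj, rfl⟩ := List.mem_map.mp hp
        have := (mem_pairsOf ht hp').2.1
        simp only at this
        have := hx x this
        omega

-- nested loops over a strictly increasing list = one fold over its ordered pairs
theorem nested_fold {α : Type} (B2 : α → Nat → Nat → α) :
    ∀ (ys : List Nat), ys.Pairwise (· < ·) → ∀ (m : α),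
      ys.foldl (fun m i => ((ys.filter (fun j => decide (i < j))).foldl
                  (fun m j => B2 m i j) m)) m
      = (pairsOf ys).foldl (fun m p => B2 m p.1 p.2) m := by
  intro ys
  induction ys with
  | nil => intro _ m; rfl
  | cons x t ih =>
      intro hs m
      obtain ⟨hx, ht⟩ := List.pairwise_cons.mp hs
      rw [List.foldl_cons]
      have hfx : (x :: t).filter (fun j => decide (x < j)) = t := by
        rw [List.filter_cons]
        simp only [lt_irrefl, decide_false, if_false]
        exact List.filter_eq_self.mpr (fun a ha => by simpa using hx a ha)
      have hcongr : ∀ (m : α), ∀ i ∈ t,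
          ((x :: t).filter (fun j => decide (i < j))).foldl (fun m j => B2 m i j) m
          = (t.filter (fun j => decide (i < j))).foldl (fun m j => B2 m i j) m := by
        intro m i hi
        have : ¬ (i < x) := by have := hx i hi; omega
        rw [List.filter_cons]
        simp [this]
      rw [hfx, PySem.List.foldl_congr_mem t _ _ _ hcongr, ih ht]
      rw [pairsOf, List.foldl_append, List.foldl_map]

-- A's per-vector double loop = fold of double bumps over the pair list
theorem loopA_eq_pairs (cs : List Char) (m : List (List Int)) :
    (List.range cs.length).foldl
      (fun m i => if cs.getD i ' ' = '1' then pvInnerA cs i m else m) m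
    = (pairsOf (pvOnes cs)).foldl (fun m p => pvBump (pvBump m p.1 p.2) p.2 p.1) m := by
  have h1 : ∀ (i : Nat) (m : List (List Int)),
      pvInnerA cs i m
      = ((pvOnes cs).filter (fun j => decide (i < j))).foldl
          (fun m j => pvBump (pvBump m i j) j i) m := by
    intro i m
    unfold pvInnerA
    rw [show (fun (m : List (List Int)) (j : Nat) =>
          if cs.getD j ' ' = '1' then pvBump (pvBump m i j) j i else m)
        = (fun m j => if (fun j => decide (cs.getD j ' ' = '1')) j
            then pvBump (pvBump m i j) j i else m) by funext m j; simp]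
    rw [foldl_if_filter]
    rw [range'_eq_drop cs.length (i+1), drop_range_filter, List.filter_comm]
    rfl
  have h2 : (fun (m : List (List Int)) (i : Nat) =>
        if cs.getD i ' ' = '1' then pvInnerA cs i m else m)
      = (fun m i => if (fun i => decide (cs.getD i ' ' = '1')) i then pvInnerA cs i m else m) := by
    funext m i; simp
  rw [h2, foldl_if_filter]
  have h3 : (List.range cs.length).filter (fun i => decide (cs.getD i ' ' = '1')) = pvOnes cs := rfl
  rw [h3]
  rw [PySem.List.foldl_congr_mem (pvOnes cs) _ _ _ (fun m i _ => h1 i m)]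
  exact nested_fold _ (pvOnes cs) (pairwise_pvOnes cs) m

theorem mOf_congr {L : Nat} {e e' : Nat → Nat → Int}
    (h : ∀ a b, a < L → b < L → e a b = e' a b) : mOf L e = mOf L e' := by
  unfold mOf
  apply List.map_congr_left
  intro a ha
  apply List.map_congr_left
  intro b hb
  exact h a b (List.mem_range.mp ha) (List.mem_range.mp hb)

theorem bump_mOf {L i j : Nat} (hi : i < L) (hj : j < L) (e : Nat → Nat → Int) :
    pvBump (mOf L e) i j = mOf L (fun a b => if a = i ∧ b = j then e a b + 1 else e a b) := by
  unfold pvBump mOf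
  apply List.ext_getElem
  · simp
  · intro a h1 h2
    simp only [List.getElem_modify, List.getElem_map, List.getElem_range] at *
    by_cases ha : i = a
    · subst ha
      apply List.ext_getElem
      · simp
      · intro b h3 h4
        simp only [List.getElem_modify, List.getElem_map, List.getElem_range] at *
        by_cases hb : j = b <;> simp [hb, eq_comm]
    · simp only [if_neg ha]
      apply List.map_congr_left
      intro b hb
      simp [Ne.symm ha]

-- one pair: bump (i,j) and (j,i)
theorem step_pair {L i j : Nat} (hij : i < j) (hj : j < L) (e : Nat → Nat → Int) :
    pvBump (pvBump (mOf L e) i j) j i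
    = mOf L (fun a b => e a b + if (a, b) = (i, j) ∨ (a, b) = (j, i) then 1 else 0) := by
  have hi : i < L := lt_trans hij hj
  rw [bump_mOf hi hj, bump_mOf hj hi]
  apply mOf_congr
  intro a b _ _
  simp only [Prod.mk.injEq]
  split_ifs <;> first | rfl | omega | simp_all | (exfalso; omega)

-- folding double bumps over a nodup list of ordered in-range pairs adds the pair indicator
theorem bumps_fold {L : Nat} :
    ∀ (ps : List (Nat × Nat)), (∀ p ∈ ps, p.1 < p.2 ∧ p.2 < L) → ps.Nodup →
    ∀ (e : Nat → Nat → Int),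
      ps.foldl (fun m p => pvBump (pvBump m p.1 p.2) p.2 p.1) (mOf L e)
      = mOf L (fun a b => e a b + if (a, b) ∈ ps ∨ (b, a) ∈ ps then 1 else 0) := by
  intro ps
  induction ps with
  | nil =>
      intro _ _ e
      apply mOf_congr
      intro a b _ _
      simp
  | cons p t ih =>
      intro hps hnd e
      obtain ⟨h1, h2⟩ := hps p (by simp)
      rw [List.foldl_cons, step_pair h1 h2 e,
        ih (fun q hq => hps q (by simp [hq])) (List.nodup_cons.mp hnd).2]
      apply mOf_congr
      intro a b _ _
      have hpt : p ∉ t := (List.nodup_cons.mp hnd).1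
      simp only [List.mem_cons]
      have hmt : ∀ q ∈ t, q.1 < q.2 := fun q hq => (hps q (List.mem_cons_of_mem _ hq)).1
      have hA : (a, b) = p → ¬((a, b) ∈ t ∨ (b, a) ∈ t) := by
        rintro rfl
        rintro (h | h)
        · exact hpt h
        · have := hmt _ h
          simp only at this h1
          omega
      have hB : (b, a) = p → ¬((a, b) ∈ t ∨ (b, a) ∈ t) := by
        intro hba
        rintro (h | h)
        · have := hmt _ h
          rw [← hba] at h1
          simp only at this h1
          omega
        · rw [hba] at h
          exact hpt h
      have hh : ((a, b) = (p.2, p.1)) ↔ ((b, a) = p) := by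
        simp [Prod.ext_iff, and_comm]
      have hh' : ((a, b) = (p.1, p.2)) ↔ ((a, b) = p) := by
        simp [Prod.ext_iff]
      simp only [hh, hh']
      by_cases hc1 : (a, b) = p ∨ (b, a) = p
      · have hc2 : ¬((a, b) ∈ t ∨ (b, a) ∈ t) := by
          rcases hc1 with h | h
          · exact hA h
          · exact hB h
        rw [if_pos hc1, if_neg hc2, if_pos (by
          rcases hc1 with h | h
          · exact Or.inl (Or.inl h)
          · exact Or.inr (Or.inl h))]
        ring
      · rw [if_neg hc1]
        by_cases hc2 : (a, b) ∈ t ∨ (b, a) ∈ t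
        · rw [if_pos hc2, if_pos (by
            rcases hc2 with h | h
            · exact Or.inl (Or.inr h)
            · exact Or.inr (Or.inr h))]
          ring
        · rw [if_neg hc2, if_neg (by
            rintro ((h | h) | (h | h))
            · exact hc1 (Or.inl h)
            · exact hc2 (Or.inl h)
            · exact hc1 (Or.inr h)
            · exact hc2 (Or.inr h))]
          ring

-- the per-row step: A's double loop adds pvInd to every entry
theorem rowA {L : Nat} (cs : List Char)
    (hb : ∀ p ∈ pairsOf (pvOnes cs), p.1 < p.2 ∧ p.2 < L) (e : Nat → Nat → Int) :
    (List.range cs.length).foldl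
      (fun m i => if cs.getD i ' ' = '1' then pvInnerA cs i m else m) (mOf L e)
    = mOf L (fun a b => e a b + pvInd cs a b) := by
  rw [loopA_eq_pairs, bumps_fold _ hb (nodup_pairsOf (pairwise_pvOnes cs))]
  apply mOf_congr
  intro a b _ _
  congr 1
  unfold pvInd
  congr 1
  simp only [eq_iff_iff]
  constructor
  · rintro (h | h)
    · obtain ⟨hlt, ha, hbm⟩ := mem_pairsOf (pairwise_pvOnes cs) h
      exact ⟨by omega, mem_pvOnes'.mp ha, mem_pvOnes'.mp hbm⟩
    · obtain ⟨hlt, hbm, ha⟩ := mem_pairsOf (pairwise_pvOnes cs) h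
      exact ⟨by omega, mem_pvOnes'.mp ha, mem_pvOnes'.mp hbm⟩
  · rintro ⟨hne, ha, hbm⟩
    rcases Nat.lt_or_ge a b with h | h
    · exact Or.inl (mem_pairsOf_of (pairwise_pvOnes cs) h
        (mem_pvOnes'.mpr ha) (mem_pvOnes'.mpr hbm))
    · have : b < a := by omega
      exact Or.inr (mem_pairsOf_of (pairwise_pvOnes cs) this
        (mem_pvOnes'.mpr hbm) (mem_pvOnes'.mpr ha))

-- the two '1's of any pair lie below L when Pre_ holds for the vector
theorem pairs_bounded {L : Nat} (cs : List Char)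
    (hcs : cs.count '1' ≤ 1 ∨ (cs.drop L).count '1' = 0) :
    ∀ p ∈ pairsOf (pvOnes cs), p.1 < p.2 ∧ p.2 < L := by
  intro p hp
  obtain ⟨hlt, hmem1, hmem2⟩ := mem_pairsOf (pairwise_pvOnes cs) hp
  refine ⟨hlt, ?_⟩
  have hlen : 2 ≤ (pvOnes cs).length := by
    by_contra hcon
    have hle : (pvOnes cs).length ≤ 1 := by omega
    have hsh : pvOnes cs = [] ∨ ∃ a, pvOnes cs = [a] := by
      rcases Nat.le_one_iff_eq_zero_or_eq_one.mp hle with h | h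
      · exact Or.inl (List.length_eq_zero_iff.mp h)
      · exact Or.inr (List.length_eq_one_iff.mp h)
    rcases hsh with h | ⟨a, h⟩ <;> rw [h] at hmem1 hmem2 <;> simp_all
  rcases hcs with hc | hc
  · rw [pvOnes_length] at hlen; omega
  · by_contra hge
    obtain ⟨hp2len, hp2one⟩ := mem_pvOnes.mp hmem2
    have hLle : L ≤ p.2 := by omega
    have hmem : '1' ∈ cs.drop L := by
      have hlt' : p.2 - L < (cs.drop L).length := by
        rw [List.length_drop]; omega
      have heq : (cs.drop L)[p.2 - L]'hlt' = cs[p.2]'hp2len := by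
        rw [List.getElem_drop]; congr 1; omega
      have hcs1 : cs[p.2]'hp2len = '1' := by
        rwa [List.getD_eq_getElem cs ' ' hp2len] at hp2one
      exact List.mem_iff_getElem.mpr ⟨p.2 - L, hlt', heq.trans hcs1⟩
    exact absurd (List.count_eq_zero.mp hc) (fun h => h hmem)

-- A's fold over all rows adds the row count to every off-diagonal entry
theorem rowsA {L : Nat} :
    ∀ (rows : List String),
      (∀ s ∈ rows, s.toList.count '1' ≤ 1 ∨ (s.toList.drop L).count '1' = 0) →
    ∀ (e : Nat → Nat → Int),
      rows.foldl
        (fun m bv =>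
          (List.range bv.toList.length).foldl
            (fun m i => if bv.toList.getD i ' ' = '1' then pvInnerA bv.toList i m else m) m)
        (mOf L e)
      = mOf L (fun a b => e a b + if a = b then 0 else pvCnt rows a b) := by
  intro rows
  induction rows with
  | nil =>
      intro _ e
      apply mOf_congr
      intro a b _ _
      simp [pvCnt]
  | cons bv t ih =>
      intro hl e
      rw [List.foldl_cons, rowA bv.toList (pairs_bounded bv.toList (hl bv (by simp))),
        ih (fun s hs => hl s (by simp [hs]))]
      apply mOf_congr
      intro a b _ _
      have hcnt : pvCnt (bv :: t) a b
          = (if bv.toList.getD a ' ' = '1' ∧ bv.toList.getD b ' ' = '1' then 1 else 0)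
            + pvCnt t a b := by
        unfold pvCnt
        rw [List.filter_cons]
        split_ifs with h1 h2 h2 <;> simp_all <;> push_cast <;> ring
      rw [hcnt]
      unfold pvInd
      split_ifs <;> simp_all <;> ring

-- the initial all-zero matrix
theorem mOf_zero (L : Nat) :
    List.replicate L (List.replicate L (0 : Int)) = mOf L (fun _ _ => 0) := by
  unfold mOf
  rw [eq_comm, List.eq_replicate_iff]
  constructor
  · simp
  · intro r hr
    obtain ⟨i, _, rfl⟩ := List.mem_map.mp hr
    rw [List.eq_replicate_iff]
    simp

-- B's inner loop: the set stored at k gains v exactly when the character at k is '1'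
theorem innerB_getD (v : Nat) :
    ∀ (cs : List Char) (n : Nat) (d : PySem.Dict Nat (PySem.Set Nat)) (k : Nat),
      ((cs.zipIdx n).foldl
          (fun d q => if q.1 = '1' then d.modify q.2 PySem.Set.empty (fun s => s.add v) else d)
          d).getD k PySem.Set.empty
      = if n ≤ k ∧ cs.getD (k - n) ' ' = '1'
          then (d.getD k PySem.Set.empty).add v else d.getD k PySem.Set.empty := by
  intro cs
  induction cs with
  | nil =>
      intro n d k
      have : ([] : List Char).getD (k - n) ' ' = ' ' := rfl
      simp [this]
  | cons c t ih =>
      intro n d k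
      rw [List.zipIdx_cons, List.foldl_cons]
      simp only
      rw [ih (n + 1)]
      rcases Nat.lt_trichotomy k n with hk | hk | hk
      · rw [if_neg (show ¬ (n + 1 ≤ k ∧ t.getD (k - (n + 1)) ' ' = '1') from
            fun h => absurd h.1 (by omega)),
          if_neg (show ¬ (n ≤ k ∧ (c :: t).getD (k - n) ' ' = '1') from
            fun h => absurd h.1 (by omega))]
        split_ifs with hc
        · rw [PySem.Dict.getD_modify, if_neg (by omega)]
        · rfl
      · subst hk
        rw [if_neg (show ¬ (k + 1 ≤ k ∧ t.getD (k - (k + 1)) ' ' = '1') from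
          fun h => absurd h.1 (by omega))]
        simp only [Nat.sub_self, List.getD_cons_zero]
        split_ifs with hc h2 h2
        · rw [PySem.Dict.getD_modify, if_pos rfl]
        · exact absurd ⟨le_refl k, hc⟩ h2
        · exact absurd h2.2 hc
        · rfl
      · have hgt : (c :: t).getD (k - n) ' ' = t.getD (k - (n + 1)) ' ' := by
          have : k - n = (k - (n + 1)) + 1 := by omega
          rw [this, List.getD_cons_succ]
        rw [hgt]
        have hd1 : (if c = '1' then d.modify n PySem.Set.empty (fun s => s.add v) else d).getD k
            PySem.Set.empty = d.getD k PySem.Set.empty := by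
          split_ifs with hc
          · rw [PySem.Dict.getD_modify, if_neg (by omega)]
          · rfl
        rw [hd1]
        have hiff : (n + 1 ≤ k ∧ t.getD (k - (n + 1)) ' ' = '1')
            ↔ (n ≤ k ∧ t.getD (k - (n + 1)) ' ' = '1') := by
          constructor <;> (rintro ⟨h, h'⟩; exact ⟨by omega, h'⟩)
        rw [if_congr hiff rfl rfl]

-- the column set after processing all rows: the row ids with '1' at column k, in order
theorem pvAddOnes_getD (v : Nat) (cs : List Char) (d : PySem.Dict Nat (PySem.Set Nat))
    (k : Nat) :
    (pvAddOnes v cs d).getD k PySem.Set.empty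
    = if cs.getD k ' ' = '1' then (d.getD k PySem.Set.empty).add v
      else d.getD k PySem.Set.empty := by
  unfold pvAddOnes
  rw [innerB_getD v cs 0 d k]
  have hiff : (0 ≤ k ∧ cs.getD (k - 0) ' ' = '1') ↔ (cs.getD k ' ' = '1') := by simp
  rw [if_congr hiff rfl rfl]

-- the column set after processing all rows: the row ids with '1' at column k, in order
theorem colsB_getD (bvs : List String) (k : Nat) :
    (bvs.zipIdx.foldl (fun d p => pvAddOnes p.2 p.1.toList d) PySem.Dict.empty).getD k
        PySem.Set.empty
    = (List.range bvs.length).filter (fun v => decide ((bvs.getD v "").toList.getD k ' ' = '1'))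
    := by
  induction bvs using List.reverseRecOn with
  | nil => simp [PySem.Dict.getD_empty]
  | append_singleton rows r ih =>
      rw [List.zipIdx_append, List.foldl_append]
      simp only [List.zipIdx_cons, List.zipIdx_nil, List.foldl_cons, List.foldl_nil,
        Nat.zero_add]
      have hfilt : (List.range rows.length).filter
            (fun v => decide (((rows ++ [r]).getD v "").toList.getD k ' ' = '1'))
          = (List.range rows.length).filter
            (fun v => decide ((rows.getD v "").toList.getD k ' ' = '1')) := by
        apply List.filter_congr
        intro v hv
        rw [List.getD_append _ _ _ _ (by simpa using List.mem_range.mp hv)]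
      have hlast : ((rows ++ [r]).getD rows.length "").toList.getD k ' '
          = r.toList.getD k ' ' := by
        rw [List.getD_append_right _ _ _ _ (le_refl _)]
        simp
      have hnomem : rows.length ∉ (rows.zipIdx.foldl
          (fun d p => pvAddOnes p.2 p.1.toList d) PySem.Dict.empty).getD k PySem.Set.empty := by
        rw [ih]
        intro hmem
        have := List.mem_range.mp (List.mem_filter.mp hmem).1
        omega
      rw [List.length_append, List.length_singleton, List.range_succ, List.filter_append,
        hfilt, ← ih, List.filter_singleton, hlast, pvAddOnes_getD]
      split_ifs with hc
      · rw [show (decide (r.toList.getD k ' ' = '1')) = true from decide_eq_true hc]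
        unfold PySem.Set.add
        rw [if_neg (fun h => hnomem ((PySem.Set.contains_iff _ _).mp h))]
        rfl
      · rw [show (decide (r.toList.getD k ' ' = '1')) = false from decide_eq_false hc]
        simp

-- length of the intersection of two filtered ranges
theorem inter_filter_length (N : Nat) (p q : Nat → Bool) :
    (PySem.Set.inter ((List.range N).filter p) ((List.range N).filter q)).length
    = ((List.range N).filter (fun v => p v && q v)).length := by
  unfold PySem.Set.inter
  rw [List.filter_filter]
  congr 1
  apply List.filter_congr
  intro v hv
  have hcq : (((List.range N).filter q).contains v) = q v := by
    by_cases hq : q v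
    · rw [hq]
      exact List.contains_iff_mem.mpr (List.mem_filter.mpr ⟨hv, hq⟩)
    · have h1 : v ∉ (List.range N).filter q := fun h => hq (List.mem_filter.mp h).2
      have h2 : ¬ ((List.range N).filter q).contains v = true :=
        fun hcon => h1 (List.contains_iff_mem.mp hcon)
      rw [Bool.not_eq_true] at hq h2
      rw [h2, hq]
  show (((List.range N).filter q).contains v && p v) = (p v && q v)
  rw [hcq, Bool.and_comm]

-- counting rows by index = counting rows by value
theorem filter_range_getD (l : List String) (P : String → Bool) :
    ((List.range l.length).filter (fun v => P (l.getD v ""))).length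
    = (l.filter P).length := by
  induction l using List.reverseRecOn with
  | nil => simp
  | append_singleton t x ih =>
      rw [List.length_append, List.length_singleton, List.range_succ, List.filter_append,
        List.filter_append, List.length_append, List.length_append]
      have h1 : (List.range t.length).filter
            (fun v => P ((t ++ [x]).getD v ""))
          = (List.range t.length).filter (fun v => P (t.getD v "")) := by
        apply List.filter_congr
        intro v hv
        rw [List.getD_append _ _ _ _ (by simpa using List.mem_range.mp hv)]
      have h2 : (t ++ [x]).getD t.length "" = x := by
        rw [List.getD_append_right _ _ _ _ (le_refl _)]
        simp
      rw [h1, ih, List.filter_singleton, List.filter_singleton, h2]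
      cases hPx : P x <;> simp [hPx]

-- ===== VERDICT (by name: the statement is the Claim_ definition above) =====
theorem count_commutations_spec : Claim_equal_count_commutations := by
  intro bvs _ ⟨_, hall⟩
  unfold Spec_count_commutations count_commutations count_commutations_alt
  simp only
  set L := (bvs.headD "").toList.length with hL
  rw [mOf_zero, rowsA bvs hall]
  have hcols := colsB_getD bvs
  have hB : (List.range L).map (fun i =>
      (List.range L).map (fun j =>
        if i = j then (0 : Int)
        else ((PySem.Set.inter ((bvs.zipIdx.foldl (fun d p => pvAddOnes p.2 p.1.toList d)
            PySem.Dict.empty).getD i PySem.Set.empty)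
            ((bvs.zipIdx.foldl (fun d p => pvAddOnes p.2 p.1.toList d)
            PySem.Dict.empty).getD j PySem.Set.empty)).length : Int)))
      = mOf L (fun i j =>
        if i = j then 0
        else ((PySem.Set.inter ((List.range bvs.length).filter
            (fun v => decide ((bvs.getD v "").toList.getD i ' ' = '1')))
            ((List.range bvs.length).filter
            (fun v => decide ((bvs.getD v "").toList.getD j ' ' = '1')))).length : Int)) := by
    unfold mOf
    apply List.map_congr_left
    intro i _
    apply List.map_congr_left
    intro j _
    rw [hcols i, hcols j]
  rw [hB]
  apply mOf_congr
  intro a b _ _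
  by_cases hab : a = b
  · simp [hab]
  · rw [if_neg hab, if_neg hab, inter_filter_length]
    unfold pvCnt
    rw [Int.ofNat_inj.mpr (filter_range_getD bvs
      (fun s => decide (s.toList.getD a ' ' = '1') && decide (s.toList.getD b ' ' = '1')))]
    omega
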